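-- pv_equiv track=rewrite | github.com/wwwwodddd/Zukunft | CF/1999E.py | F
-- ===== SOURCE A (Python) =====
-- def F(x):
-- 	b = 1
-- 	c = 1
-- 	z = 0
-- 	while b * 3 <= x:
-- 		z += b * 2 * c
-- 		b *= 3
-- 		c += 1
-- 	return z + (x - b) * c
-- ===== SOURCE B (Python) =====
-- def F(x):
--     t = x
--     m = 0
--     while t >= 3:
--         t //= 3
--         m += 1
--     b = 3 ** m
--     z = (1 + b * (2 * m - 1)) // 2
--     return z + (x - b) * (m + 1)
-- ===== Notes on version B (the rewrite author's own statement) =====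
-- stated objective: alternative
-- what changed: Replaces A's accumulating loop (which multiplies b by 3 while summing 2*b*c) by a divide-down loop that only counts the exponent m = floor(log3 x), then computes the accumulated sum in closed form (1 + 3^m*(2m-1))//2.
import Mathlib
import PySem

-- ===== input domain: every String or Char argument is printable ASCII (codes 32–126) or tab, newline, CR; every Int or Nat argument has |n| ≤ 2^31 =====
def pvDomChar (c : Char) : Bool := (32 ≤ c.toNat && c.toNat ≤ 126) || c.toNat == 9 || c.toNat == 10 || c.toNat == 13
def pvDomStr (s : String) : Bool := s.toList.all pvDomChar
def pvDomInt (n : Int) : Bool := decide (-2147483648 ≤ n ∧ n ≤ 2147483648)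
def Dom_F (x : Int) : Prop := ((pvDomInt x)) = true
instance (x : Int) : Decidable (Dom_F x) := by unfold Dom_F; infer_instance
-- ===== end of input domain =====

-- B replaces A's accumulating multiply loop by a divide-down exponent count plus a
-- closed-form sum (objective: alternative decomposition; same logarithmic cost).

-- ===== PORT A =====
-- A's while loop; `hb : 0 < b` is a termination hypothesis (A only ever runs it with b = 1).
def loopA (x b c z : Int) (hb : 0 < b) : Int :=
  if h : b * 3 ≤ x then
    loopA x (b * 3) (c + 1) (z + b * 2 * c) (by omega)
  else
    z + (x - b) * c
termination_by (x - b).toNat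
decreasing_by omega

def F (x : Int) : Int := loopA x 1 1 0 (by omega)

-- ===== PORT B =====
-- B's while loop: divide t down by 3, counting steps.
def loopB (t m : Int) : Int :=
  if h : 3 ≤ t then loopB (PySem.Int.floordiv t 3) (m + 1) else m
termination_by t.toNat
decreasing_by
  have h1 := (PySem.Int.le_floordiv_iff_mul_le (a := t) (b := 3) (q := 1) (by omega)).mpr (by omega)
  have h2 := (PySem.Int.floordiv_lt_iff_lt_mul (a := t) (b := 3) (q := t) (by omega)).mpr (by omega)
  omega

def F_alt (x : Int) : Int :=
  let m := loopB x 0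
  let b := (3 : Int) ^ m.toNat   -- 3 ** m; exact since m ≥ 0 always holds here
  let z := PySem.Int.floordiv (1 + b * (2 * m - 1)) 2
  z + (x - b) * (m + 1)

-- ===== PRECONDITION & SPEC =====
def Spec_F (x : Int) (out : Int) : Prop := out = F_alt x
instance (x : Int) (out : Int) : Decidable (Spec_F x out) := by unfold Spec_F; infer_instance

-- ===== CLAIM (what is proved, stated in full; the proofs are below) =====
def Claim_equal_F : Prop := ∀ (x : Int), Dom_F x → Spec_F x (F x)

-- ===== LEMMAS AND PROOFS =====

-- facts about Python's t // 3 for t ≥ 3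
theorem fdiv3_facts (t : Int) (ht : 3 ≤ t) :
    1 ≤ PySem.Int.floordiv t 3 ∧ PySem.Int.floordiv t 3 * 3 ≤ t ∧
      t < (PySem.Int.floordiv t 3 + 1) * 3 := by
  refine ⟨(PySem.Int.le_floordiv_iff_mul_le (by omega)).mpr (by omega),
    (PySem.Int.le_floordiv_iff_mul_le (by omega)).mp le_rfl, ?_⟩
  exact (PySem.Int.floordiv_lt_iff_lt_mul (by omega)).mp (by omega)

theorem loopB_base (t m : Int) (h : ¬ (3 ≤ t)) : loopB t m = m := by
  rw [loopB]; simp [h]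

theorem loopB_shift (t m : Int) : loopB t m = loopB t 0 + m := by
  have key : ∀ n : Nat, ∀ t m : Int, t.toNat ≤ n → loopB t m = loopB t 0 + m := by
    intro n
    induction n with
    | zero =>
      intro t m ht
      rw [loopB_base t m (by omega), loopB_base t 0 (by omega)]
      omega
    | succ n ih =>
      intro t m ht
      by_cases h : 3 ≤ t
      · obtain ⟨h1, h2, h3⟩ := fdiv3_facts t h
        rw [loopB, loopB.eq_def t 0]
        simp only [dif_pos h]
        rw [ih _ (m + 1) (by omega), ih _ (0 + 1) (by omega)]
        omega
      · rw [loopB, loopB.eq_def t 0]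
        simp [h]
  exact key t.toNat t m le_rfl

-- the count m := loopB x 0 satisfies 0 ≤ m, x < 3^m * 3, and (if positive input) 3^m ≤ x
theorem loopB_spec (t : Int) :
    0 ≤ loopB t 0 ∧ t < 3 ^ (loopB t 0).toNat * 3 ∧ (1 ≤ t → 3 ^ (loopB t 0).toNat ≤ t) := by
  have key : ∀ n : Nat, ∀ t : Int, t.toNat ≤ n →
      0 ≤ loopB t 0 ∧ t < 3 ^ (loopB t 0).toNat * 3 ∧ (1 ≤ t → 3 ^ (loopB t 0).toNat ≤ t) := by
    intro n
    induction n with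
    | zero =>
      intro t ht
      rw [loopB_base t 0 (by omega)]
      simp
      omega
    | succ n ih =>
      intro t ht
      by_cases h : 3 ≤ t
      · obtain ⟨h1, h2, h3⟩ := fdiv3_facts t h
        set t' := PySem.Int.floordiv t 3 with ht'
        rw [loopB]
        simp only [dif_pos h]
        rw [← ht', loopB_shift]
        obtain ⟨ih1, ih2, ih3⟩ := ih t' (by omega)
        have ih3' := ih3 (by omega)
        have hto : (loopB t' 0 + (0 + 1)).toNat = (loopB t' 0).toNat + 1 := by omega
        rw [hto, pow_succ]
        refine ⟨by omega, by nlinarith, fun _ => by nlinarith⟩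
      · rw [loopB_base t 0 h]
        simp
        omega
  exact key t.toNat t le_rfl

-- the sum A's loop accumulates, in A's own recursion shape
def S (b c : Int) (m : Nat) : Int :=
  match m with
  | 0 => 0
  | m + 1 => b * 2 * c + S (b * 3) (c + 1) m

theorem loopA_eq (m : Nat) : ∀ (x b c z : Int) (hb : 0 < b),
    (∀ j : Nat, j < m → b * 3 ^ (j + 1) ≤ x) → ¬ (b * 3 ^ m * 3 ≤ x) →
    loopA x b c z hb = z + S b c m + (x - b * 3 ^ m) * (c + m) := by
  induction m with
  | zero =>
    intro x b c z hb _ hend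
    rw [loopA]
    simp only [pow_zero] at hend ⊢
    simp [show ¬ (b * 3 ≤ x) by omega, S]
  | succ m ih =>
    intro x b c z hb hall hend
    have h0 : b * 3 ≤ x := by
      have := hall 0 (by omega); simpa using this
    rw [loopA]
    simp only [dif_pos h0]
    rw [ih x (b * 3) (c + 1) (z + b * 2 * c) (by omega)
      (fun j hj => by
        have := hall (j + 1) (by omega)
        calc b * 3 * 3 ^ (j + 1) = b * 3 ^ (j + 1 + 1) := by ring
        _ ≤ x := this)
      (by
        intro hc
        apply hend
        calc b * 3 ^ (m + 1) * 3 = b * 3 * 3 ^ m * 3 := by ring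
        _ ≤ x := hc)]
    show _ = z + S b c (m + 1) + _
    rw [S]
    push_cast
    ring

theorem S_closed (m : Nat) : ∀ b c : Int,
    2 * S b c m = b * ((2 * c + 2 * m - 3) * 3 ^ m - 2 * c + 3) := by
  induction m with
  | zero => intro b c; simp [S]
  | succ m ih =>
    intro b c
    rw [S, mul_add, ih (b * 3) (c + 1), pow_succ]
    push_cast
    ring

theorem fdiv_double (k : Int) : PySem.Int.floordiv (2 * k) 2 = k := by
  rw [PySem.Int.floordiv_eq_iff_of_pos (by omega)]
  omega

-- ===== VERDICT (by name: the statement is the Claim_ definition above) =====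
theorem F_spec : Claim_equal_F := by
  intro x _
  unfold Spec_F F F_alt
  obtain ⟨hm0, hlt, hge⟩ := loopB_spec x
  set m : Int := loopB x 0 with hm
  set mn : Nat := m.toNat with hmn
  have hcast : (mn : Int) = m := by omega
  have hA : loopA x 1 1 0 (by omega) = 0 + S 1 1 mn + (x - 1 * 3 ^ mn) * (1 + mn) := by
    apply loopA_eq
    · intro j hj
      by_cases hx : x < 3
      · rw [loopB_base x 0 (by omega)] at hm
        omega
      · have h1 : (3 : Int) ^ mn ≤ x := hge (by omega)
        have h2 : (3 : Int) ^ (j + 1) ≤ 3 ^ mn :=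
          pow_le_pow_right₀ (by omega) (by omega)
        omega
    · omega
  rw [hA]
  have hz : 1 + (3 : Int) ^ mn * (2 * m - 1) = 2 * S 1 1 mn := by
    rw [S_closed mn 1 1, ← hcast]
    push_cast
    ring
  dsimp only
  rw [hz, fdiv_double]
  rw [← hcast]
  simp only [Int.toNat_natCast]
  ring
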